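-- pv_equiv track=rewrite | github.com/TorpedusMaximus/aoc2025 | day1/day1.py | ex2
-- ===== SOURCE A (Python) =====
-- def ex2(data):
--     position = 50
--     password = 0
--
--     for rotation, steps in data:
--         prev_position = position
--
--         if rotation == 'L':
--             position -= steps
--             password += (prev_position - 1) // 100 - (position - 1) // 100
--         else:
--             position += steps
--             password += position // 100 - prev_position // 100
--
--     return password
-- ===== SOURCE B (Python) =====
-- def ex2(data):
--     # two passes: build the running positions first, then count boundary crossings
--     positions = [50]
--     for rotation, steps in data:
--         positions.append(positions[-1] + (-steps if rotation == 'L' else steps))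
--     return sum(
--         (p - 1) // 100 - (c - 1) // 100 if rotation == 'L' else c // 100 - p // 100
--         for (rotation, _), p, c in zip(data, positions, positions[1:])
--     )
-- ===== Notes on version B (the rewrite author's own statement) =====
-- stated objective: alternative
-- what changed: Replaced A's single fused loop carrying (position, password) state with two passes: first build the list of running positions from signed deltas, then sum the boundary-crossing counts over zip(data, positions, positions[1:]).
import Mathlib
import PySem

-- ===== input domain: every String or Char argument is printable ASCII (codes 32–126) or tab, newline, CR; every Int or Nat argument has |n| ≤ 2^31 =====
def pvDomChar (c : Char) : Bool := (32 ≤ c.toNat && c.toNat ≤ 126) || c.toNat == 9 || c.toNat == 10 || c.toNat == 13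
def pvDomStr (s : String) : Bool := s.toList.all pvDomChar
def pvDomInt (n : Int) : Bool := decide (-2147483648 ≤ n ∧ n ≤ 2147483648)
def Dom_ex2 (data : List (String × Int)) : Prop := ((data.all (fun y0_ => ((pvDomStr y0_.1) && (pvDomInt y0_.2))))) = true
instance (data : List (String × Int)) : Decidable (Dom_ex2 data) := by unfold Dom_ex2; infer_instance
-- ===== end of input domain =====

-- B rebuilds the computation as two passes (running positions, then crossing counts);
-- objective: alternative decomposition, same O(n) cost.

-- ===== PORT A =====
-- the for-loop over data carrying (position, password)
def ex2Loop : List (String × Int) → Int → Int → Int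
  | [], _, password => password
  | (rotation, steps) :: rest, position, password =>
    let prev_position := position
    if rotation == "L" then
      let position' := position - steps
      ex2Loop rest position'
        (password + (PySem.Int.floordiv (prev_position - 1) 100 - PySem.Int.floordiv (position' - 1) 100))
    else
      let position' := position + steps
      ex2Loop rest position'
        (password + (PySem.Int.floordiv position' 100 - PySem.Int.floordiv prev_position 100))

def ex2 (data : List (String × Int)) : Int := ex2Loop data 50 0

-- ===== PORT B =====
-- first pass of Source B: positions = [50]; for each move append last + signed delta
def ex2Positions : Int → List (String × Int) → List Int
  | p, [] => [p]
  | p, (rotation, steps) :: rest =>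
    p :: ex2Positions (p + (if rotation == "L" then -steps else steps)) rest

-- second pass of Source B: one crossing count per (move, prev, cur) triple
def ex2Cross (m : (String × Int) × Int × Int) : Int :=
  if m.1.1 == "L" then
    PySem.Int.floordiv (m.2.1 - 1) 100 - PySem.Int.floordiv (m.2.2 - 1) 100
  else
    PySem.Int.floordiv m.2.2 100 - PySem.Int.floordiv m.2.1 100

def ex2_alt (data : List (String × Int)) : Int :=
  let positions := ex2Positions 50 data
  ((data.zip (positions.zip positions.tail)).map ex2Cross).sum

-- ===== PRECONDITION & SPEC =====
def Spec_ex2 (data : List (String × Int)) (out : Int) : Prop := out = ex2_alt data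
instance (data : List (String × Int)) (out : Int) : Decidable (Spec_ex2 data out) := by unfold Spec_ex2; infer_instance

-- ===== CLAIM (what is proved, stated in full; the proofs are below) =====
def Claim_equal_ex2 : Prop := ∀ (data : List (String × Int)), Dom_ex2 data → Spec_ex2 data (ex2 data)

-- ===== LEMMAS AND PROOFS =====
def ex2AltBody (p : Int) (data : List (String × Int)) : Int :=
  let positions := ex2Positions p data
  ((data.zip (positions.zip positions.tail)).map ex2Cross).sum

theorem ex2Positions_cons (p : Int) (r : String) (s : Int) (rest : List (String × Int)) :
    ex2Positions p ((r, s) :: rest)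
      = p :: ex2Positions (p + (if r == "L" then -s else s)) rest := rfl

theorem ex2Positions_head (p : Int) (l : List (String × Int)) :
    ∃ t, ex2Positions p l = p :: t := by
  cases l with
  | nil => exact ⟨[], rfl⟩
  | cons h t => cases h with
    | mk r s => exact ⟨_, rfl⟩

theorem ex2AltBody_cons (p : Int) (r : String) (s : Int) (rest : List (String × Int)) :
    ex2AltBody p ((r, s) :: rest)
      = ex2Cross ((r, s), p, p + (if r == "L" then -s else s))
        + ex2AltBody (p + (if r == "L" then -s else s)) rest := by
  obtain ⟨t, ht⟩ := ex2Positions_head (p + (if r == "L" then -s else s)) rest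
  simp only [ex2AltBody, ex2Positions_cons, ht]
  simp [List.zip_cons_cons]

theorem ex2Loop_eq_altBody (data : List (String × Int)) :
    ∀ (p pw : Int), ex2Loop data p pw = pw + ex2AltBody p data := by
  induction data with
  | nil => intro p pw; simp [ex2Loop, ex2AltBody, ex2Positions]
  | cons h rest ih =>
    intro p pw
    cases h with
    | mk r s =>
      rw [ex2AltBody_cons]
      by_cases hL : r == "L"
      · simp only [ex2Loop, hL, if_true, ih, ex2Cross]
        simp [sub_eq_add_neg, add_comm, add_left_comm]
      · simp only [ex2Loop, hL, ih, ex2Cross]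
        simp [add_comm, add_left_comm]

-- ===== VERDICT (by name: the statement is the Claim_ definition above) =====
theorem ex2_spec : Claim_equal_ex2 := by
  intro data _
  unfold Spec_ex2 ex2 ex2_alt
  rw [ex2Loop_eq_altBody data 50 0]
  simp [ex2AltBody]
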